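-- pv_equiv track=rewrite | github.com/Codechef-SRM-NCR-Chapter/30-DaysOfCode-March-2021 | answers/vjha21/Day16/question1.py | count_ones
-- ===== SOURCE A (Python) =====
-- def count_ones(array, low, high):
--     if high >= low:
--         middle = low + (high - low) // 2
--         if (middle == high or array[middle + 1] == 0) and array[middle] == 1:
--             return middle + 1
--         if array[middle] == 1:
--             return count_ones(array, (middle + 1), high)
--         return count_ones(array, low, middle - 1)
-- ===== SOURCE B (Python) =====
-- def count_ones(array, low, high):
--     while high >= low:
--         middle = low + (high - low) // 2
--         if (middle == high or array[middle + 1] == 0) and array[middle] == 1: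
--             return middle + 1
--         if array[middle] == 1:
--             low = middle + 1
--         else:
--             high = middle - 1
--     return None
-- ===== Notes on version B (the rewrite author's own statement) =====
-- stated objective: idiomatic
-- what changed: The tail-recursive binary search is rewritten as an iterative while-loop over a (low, high) state, with an explicit 'return None' when the range empties; in Lean the loop is modelled as a step function driven to a fixpoint rather than A's direct three-way recursion.
-- outside the precondition, e.g. on count_ones([1, 0], -2, 2): A returns 1, B returns 1
import Mathlib
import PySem

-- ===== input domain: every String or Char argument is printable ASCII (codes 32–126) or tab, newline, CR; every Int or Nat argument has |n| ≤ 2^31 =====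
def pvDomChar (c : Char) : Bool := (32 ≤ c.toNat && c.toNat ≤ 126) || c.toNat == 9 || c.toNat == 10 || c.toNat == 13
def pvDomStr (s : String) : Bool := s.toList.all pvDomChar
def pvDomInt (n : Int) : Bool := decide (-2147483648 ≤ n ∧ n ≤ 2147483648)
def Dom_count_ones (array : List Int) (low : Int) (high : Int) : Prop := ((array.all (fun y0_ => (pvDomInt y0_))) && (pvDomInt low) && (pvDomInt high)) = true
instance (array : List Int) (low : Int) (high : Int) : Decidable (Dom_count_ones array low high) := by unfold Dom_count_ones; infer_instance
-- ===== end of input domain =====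

-- B rewrites A's tail-recursive binary search as an iterative while-loop (ported as a
-- step function driven to a fixpoint), with an explicit `return None` when the range
-- empties; same comparisons and index accesses, same return value.

-- ===== PORT A =====
-- Literal port of A's recursion.  `none` is Python's implicit None when high < low;
-- pyGet? = Python indexing (negative indices from the end, none = IndexError, which
-- Pre_count_ones excludes).  The `or` is evaluated left to right as in Python.
def count_ones (array : List Int) (low : Int) (high : Int) : Option Int :=
  if high ≥ low then
    let middle := low + PySem.Int.floordiv (high - low) 2
    match (if middle = high then some true
           else (PySem.List.pyGet? array (middle + 1)).map (fun v => decide (v = 0))),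
          PySem.List.pyGet? array middle with
    | some c1, some am =>
        if c1 && decide (am = 1) then some (middle + 1)
        else if am = 1 then count_ones array (middle + 1) high
        else count_ones array low (middle - 1)
    | _, _ => none   -- IndexError: outside Pre_count_ones
  else none
termination_by (high - low + 1).toNat
decreasing_by
  all_goals
    simp only [PySem.Int.floordiv_eq_ediv_of_pos (by norm_num : (0:Int) < 2)] at *
    omega

-- ===== PORT B =====
-- One iteration of B's while-loop: `Sum.inl` carries the updated (low, high) state,
-- `Sum.inr` is a `return` from inside the loop (or the IndexError case, outside Pre_).
def pvStep (array : List Int) (low : Int) (high : Int) : (Int × Int) ⊕ Option Int :=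
  if high ≥ low then
    let middle := low + PySem.Int.floordiv (high - low) 2
    match (if middle = high then some true
           else (PySem.List.pyGet? array (middle + 1)).map (fun v => decide (v = 0))) with
    | none => Sum.inr none       -- IndexError: outside Pre_count_ones
    | some c1 =>
      match PySem.List.pyGet? array middle with
      | none => Sum.inr none     -- IndexError: outside Pre_count_ones
      | some am =>
        if c1 && decide (am = 1) then Sum.inr (some (middle + 1))
        else if am = 1 then Sum.inl (middle + 1, high)
        else Sum.inl (low, middle - 1)
  else Sum.inr none              -- loop guard fails: `return None`

-- Each loop iteration strictly shrinks the search range (used only for termination).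
theorem pvStep_dec (array : List Int) (low high : Int) (s' : Int × Int)
    (h : pvStep array low high = Sum.inl s') :
    (s'.2 - s'.1 + 1).toNat < (high - low + 1).toNat := by
  unfold pvStep at h
  split at h
  · next hge =>
    dsimp only at h
    split at h
    · simp at h
    · split at h
      · simp at h
      · split_ifs at h with h1 h2 <;>
          (obtain rfl := (Sum.inl.inj h).symm; dsimp only;
           simp only [PySem.Int.floordiv_eq_ediv_of_pos (show (0:Int) < 2 by norm_num)];
           omega)
  · simp at h

-- B's while-loop: iterate pvStep until it returns.
def pvRun (array : List Int) (low : Int) (high : Int) : Option Int :=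
  match hstep : pvStep array low high with
  | Sum.inr r => r
  | Sum.inl s' => pvRun array s'.1 s'.2
termination_by (high - low + 1).toNat
decreasing_by exact pvStep_dec array low high _ hstep

def count_ones_alt (array : List Int) (low : Int) (high : Int) : Option Int :=
  pvRun array low high

-- ===== PRECONDITION & SPEC =====
-- Pre_ excludes the out-of-bounds low/high ranges on which A's recursion in general hits an
-- IndexError (a few such inputs happen to return before the bad access; characterising those
-- in closed form would amount to re-running the search, so the whole region is excluded).
def Pre_count_ones (array : List Int) (low : Int) (high : Int) : Prop :=
  high < low ∨ (-(array.length : Int) ≤ low ∧ high < (array.length : Int))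
instance (array : List Int) (low : Int) (high : Int) : Decidable (Pre_count_ones array low high) := by unfold Pre_count_ones; infer_instance

def pvWitness_count_ones : List Int × Int × Int := ([1, 1, 0], 0, 2)

def Spec_count_ones (array : List Int) (low : Int) (high : Int) (out : Option Int) : Prop := out = count_ones_alt array low high
instance (array : List Int) (low : Int) (high : Int) (out : Option Int) : Decidable (Spec_count_ones array low high out) := by unfold Spec_count_ones; infer_instance

-- ===== CLAIM (what is proved, stated in full; the proofs are below) =====
def Claim_equal_count_ones : Prop := ∀ (array : List Int) (low : Int) (high : Int), Dom_count_ones array low high → Pre_count_ones array low high → Spec_count_ones array low high (count_ones array low high)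

-- ===== LEMMAS AND PROOFS =====

-- One-step unfolding lemmas for the loop driver pvRun.
theorem pvRun_inr (array : List Int) (low high : Int) (r : Option Int)
    (h : pvStep array low high = Sum.inr r) : pvRun array low high = r := by
  rw [pvRun.eq_def]
  split <;> simp_all

theorem pvRun_inl (array : List Int) (low high : Int) (s' : Int × Int)
    (h : pvStep array low high = Sum.inl s') :
    pvRun array low high = pvRun array s'.1 s'.2 := by
  rw [pvRun.eq_def]
  split <;> simp_all

-- The recursion and the loop agree on every input (Pre_ is not needed for the
-- return-value equality: both ports map an IndexError to none identically).
theorem count_ones_eq_pvRun (n : Nat) :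
    ∀ (array : List Int) (low high : Int), (high - low + 1).toNat ≤ n →
      count_ones array low high = pvRun array low high := by
  induction n with
  | zero =>
    intro array low high hn
    have hlt : ¬ high ≥ low := by omega
    rw [count_ones.eq_def, if_neg hlt,
        pvRun_inr array low high none (by unfold pvStep; rw [if_neg hlt])]
  | succ n ih =>
    intro array low high hn
    by_cases hge : high ≥ low
    · rw [count_ones.eq_def, if_pos hge]
      dsimp only
      cases hc1 : (if low + PySem.Int.floordiv (high - low) 2 = high then some true
             else (PySem.List.pyGet? array (low + PySem.Int.floordiv (high - low) 2 + 1)).map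
                    (fun v => decide (v = 0))) with
      | none =>
        rw [pvRun_inr array low high none
              (by unfold pvStep; rw [if_pos hge]; dsimp only; rw [hc1])]
      | some c1 =>
        cases ham : PySem.List.pyGet? array (low + PySem.Int.floordiv (high - low) 2) with
        | none =>
          rw [pvRun_inr array low high none
                (by unfold pvStep; rw [if_pos hge]; dsimp only; rw [hc1, ham])]
        | some am =>
          dsimp only
          by_cases hret : (c1 && decide (am = 1)) = true
          · rw [if_pos hret, pvRun_inr array low high
                  (some (low + PySem.Int.floordiv (high - low) 2 + 1))
                  (by unfold pvStep; rw [if_pos hge]; dsimp only; rw [hc1, ham]; dsimp only;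
                      rw [if_pos hret])]
          · rw [if_neg hret]
            by_cases h1 : am = 1
            · have hs : pvStep array low high
                  = Sum.inl (low + PySem.Int.floordiv (high - low) 2 + 1, high) := by
                unfold pvStep; rw [if_pos hge]; dsimp only; rw [hc1, ham]; dsimp only
                rw [if_neg hret, if_pos h1]
              have hd := pvStep_dec array low high _ hs
              rw [if_pos h1, pvRun_inl array low high _ hs]
              exact ih array _ high (by omega)
            · have hs : pvStep array low high
                  = Sum.inl (low, low + PySem.Int.floordiv (high - low) 2 - 1) := by
                unfold pvStep; rw [if_pos hge]; dsimp only; rw [hc1, ham]; dsimp only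
                rw [if_neg hret, if_neg h1]
              have hd := pvStep_dec array low high _ hs
              rw [if_neg h1, pvRun_inl array low high _ hs]
              exact ih array low _ (by omega)
    · rw [count_ones.eq_def, if_neg hge,
          pvRun_inr array low high none (by unfold pvStep; rw [if_neg hge])]

-- ===== VERDICT (by name: the statement is the Claim_ definition above) =====
theorem count_ones_spec : Claim_equal_count_ones := by
  intro array low high _ _
  unfold Spec_count_ones count_ones_alt
  exact count_ones_eq_pvRun ((high - low + 1).toNat) array low high le_rfl
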